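-- pv_equiv track=rewrite | github.com/pypi-data/pypi-mirror-401 | packages/klotho-cac/klotho_cac-3.15.1.tar.gz/klotho_cac-3.15.1/klotho/topos/collections/patterns.py | pair_adjacent
-- ===== SOURCE A (Python) =====
-- def pair_adjacent(elements):
--     '''
--     Creates groups where elements are paired with their adjacent elements.
--
--     Args:
--         elements: A tuple of elements to be grouped.
--
--     Returns:
--         A tuple of valid groups.
--
--     Example:
--         >> pair_adjacent((1, 2, 3, 4, 5))
--         ((1, (2, 3)), (2, (3, 4)), (3, (4, 5)), (4, (5, 1)), (5, (1, 2)))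
--     '''
--     if not elements:
--         return ()
--
--     n = len(elements)
--     if n == 1:
--         return ((elements[0], ()),)
--
--     if n == 2:
--         return ((elements[0], (elements[1],)), (elements[1], (elements[0],)))
--
--     result = []
--     for i in range(n):
--         next_idx = (i + 1) % n
--         next_next_idx = (i + 2) % n
--         result.append((elements[i], (elements[next_idx], elements[next_next_idx])))
--
--     return tuple(result)
-- ===== SOURCE B (Python) =====
-- def pair_adjacent(elements):
--     if not elements:
--         return ()
--     e = tuple(elements)
--     k = min(2, len(e) - 1)
--     rot1 = e[1:] + e[:1]
--     rot2 = e[2:] + e[:2]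
--     return tuple((x, (a, b)[:k]) for x, a, b in zip(e, rot1, rot2))
-- ===== Notes on version B (the rewrite author's own statement) =====
-- stated objective: simpler
-- what changed: Instead of A's per-index modular arithmetic with n==1/n==2 special branches, B builds two rotated copies of the sequence by slicing (e[1:]+e[:1], e[2:]+e[:2]), zips them with the original, and truncates each successor pair to min(2, n-1), so there is no index arithmetic at all.
import Mathlib
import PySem

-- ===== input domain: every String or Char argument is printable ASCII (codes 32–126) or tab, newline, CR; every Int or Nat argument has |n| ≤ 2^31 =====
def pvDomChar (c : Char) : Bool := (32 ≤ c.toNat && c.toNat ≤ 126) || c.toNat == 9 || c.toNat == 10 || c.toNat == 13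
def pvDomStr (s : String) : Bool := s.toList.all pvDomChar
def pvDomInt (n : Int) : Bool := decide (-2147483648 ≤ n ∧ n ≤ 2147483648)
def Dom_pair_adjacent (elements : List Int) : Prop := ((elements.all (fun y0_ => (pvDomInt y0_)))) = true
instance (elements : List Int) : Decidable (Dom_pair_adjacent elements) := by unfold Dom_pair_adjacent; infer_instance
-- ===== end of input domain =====

-- B builds two rotated copies of the list by slicing and zips them with the original,
-- truncating each successor pair to min(2, n-1); no index arithmetic or modulo, no
-- n==1/n==2 branches. Objective: simpler (same O(n) cost).


-- ===== PORT A =====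
def pair_adjacent (elements : List Int) : List (Int × List Int) :=
  if elements = [] then []
  else
    let n : Int := elements.length
    if n = 1 then [(PySem.List.pyGetD elements 0 0, [])]
    else if n = 2 then
      [(PySem.List.pyGetD elements 0 0, [PySem.List.pyGetD elements 1 0]),
       (PySem.List.pyGetD elements 1 0, [PySem.List.pyGetD elements 0 0])]
    else
      (PySem.List.pyRange 0 n 1).foldl (fun result i =>
        let next_idx := PySem.Int.mod (i + 1) n
        let next_next_idx := PySem.Int.mod (i + 2) n
        result ++ [(PySem.List.pyGetD elements i 0,
          [PySem.List.pyGetD elements next_idx 0, PySem.List.pyGetD elements next_next_idx 0])]) []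

-- ===== PORT B =====
def pair_adjacent_alt (elements : List Int) : List (Int × List Int) :=
  if elements = [] then []
  else
    let e := elements
    let k : Int := min 2 ((e.length : Int) - 1)
    let rot1 := PySem.List.slice e (some 1) none ++ PySem.List.slice e none (some 1)
    let rot2 := PySem.List.slice e (some 2) none ++ PySem.List.slice e none (some 2)
    (e.zip (rot1.zip rot2)).map (fun p =>
      (p.1, PySem.List.slice [p.2.1, p.2.2] none (some k)))

-- ===== PRECONDITION & SPEC =====
def Spec_pair_adjacent (elements : List Int) (out : List (Int × List Int)) : Prop := out = pair_adjacent_alt elements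
instance (elements : List Int) (out : List (Int × List Int)) : Decidable (Spec_pair_adjacent elements out) := by unfold Spec_pair_adjacent; infer_instance

-- ===== CLAIM (what is proved, stated in full; the proofs are below) =====
def Claim_equal_pair_adjacent : Prop := ∀ (elements : List Int), Dom_pair_adjacent elements → Spec_pair_adjacent elements (pair_adjacent elements)

-- ===== LEMMAS AND PROOFS =====

theorem pair_adjacent_ge_three (elements : List Int) (h : 3 ≤ elements.length) :
    pair_adjacent elements = pair_adjacent_alt elements := by
  have hne : elements ≠ [] := by intro e; rw [e] at h; simp at h
  have hn1 : ((elements.length : Int)) ≠ 1 := by omega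
  have hn2 : ((elements.length : Int)) ≠ 2 := by omega
  have hk : min 2 ((elements.length : Int) - 1) = 2 := by omega
  unfold pair_adjacent pair_adjacent_alt
  simp only [if_neg hne, if_neg hn1, if_neg hn2, hk]
  rw [PySem.List.foldl_append_singleton_eq_map, List.nil_append,
      PySem.List.pyRange_zero_natCast, List.map_map]
  have hs1 : PySem.List.slice elements (some 1) none ++ PySem.List.slice elements none (some 1)
      = elements.rotate 1 := by
    have h1 := PySem.List.slice_from_natCast elements 1
    have h2 := PySem.List.slice_to_natCast elements 1
    rw [List.rotate_eq_drop_append_take (by omega)]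
    push_cast at h1 h2; rw [h1, h2]
  have hs2 : PySem.List.slice elements (some 2) none ++ PySem.List.slice elements none (some 2)
      = elements.rotate 2 := by
    have h1 := PySem.List.slice_from_natCast elements 2
    have h2 := PySem.List.slice_to_natCast elements 2
    rw [List.rotate_eq_drop_append_take (by omega)]
    push_cast at h1 h2; rw [h1, h2]
  rw [hs1, hs2]
  apply List.ext_getElem
  · simp [List.length_zip]
  · intro i h1 h2
    simp only [List.getElem_map, List.getElem_range, List.getElem_zip]
    have hin : i < elements.length := by simpa [List.length_zip] using h2
    have hrot1 : i < (elements.rotate 1).length := by simpa using hin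
    have hrot2 : i < (elements.rotate 2).length := by simpa using hin
    have e1 : PySem.List.pyGetD elements (i : Int) 0 = elements[i] := by
      rw [PySem.List.pyGetD_eq_getElem elements 0 (by positivity) (by exact_mod_cast hin)]
      simp
    have eslice : ∀ x y : Int, PySem.List.slice [x, y] none (some 2) = [x, y] := by
      intro x y
      have := PySem.List.slice_to_natCast [x, y] 2
      simpa using this
    have emod : ∀ (j : Nat), PySem.List.pyGetD elements (PySem.Int.mod ((i : Int) + (j : Int)) (elements.length : Int)) 0
        = elements[(i + j) % elements.length]'(Nat.mod_lt _ (by omega)) := by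
      intro j
      have hc : ((i : Int) + (j : Int)) = ((i + j : Nat) : Int) := by push_cast; ring
      rw [hc, PySem.Int.mod_natCast, PySem.List.pyGetD_natCast,
          List.getD_eq_getElem _ _ (Nat.mod_lt _ (by omega))]
    have em1 := emod 1
    have em2 := emod 2
    push_cast at em1 em2
    simp only [Function.comp_apply]
    rw [em1, em2, e1, eslice, List.getElem_rotate, List.getElem_rotate]

-- ===== VERDICT (by name: the statement is the Claim_ definition above) =====
theorem pair_adjacent_spec : Claim_equal_pair_adjacent := by
  intro elements _
  unfold Spec_pair_adjacent
  match elements with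
  | [] => rfl
  | [a] =>
      unfold pair_adjacent pair_adjacent_alt
      simp [PySem.List.slice, PySem.List.pyGetD, PySem.List.pyGet?, PySem.List.pyIdx?]
  | [a, b] =>
      unfold pair_adjacent pair_adjacent_alt
      simp [PySem.List.slice, PySem.List.pyGetD, PySem.List.pyGet?, PySem.List.pyIdx?]
  | a :: b :: c :: rest =>
      exact pair_adjacent_ge_three _ (by simp)
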